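-- pv_equiv track=rewrite | github.com/fabienleite/IOMMU-dumper | poc/display_html.py | unify_common_space
-- ===== SOURCE A (Python) =====
-- def unify_common_space(memory_state):
--     """
--     Merges the common space for various devices.
--     Each one may not have the same size in the shared space whereas they seem to all have access to the whole space.
--     Input:
--         - memory_state : the state in which the memory is with all its fragments.
--     Output:
--         The memory with common space merged.
--     """
--     new_memory_state = [memory_state[0]]
--     for i in range(1, len(memory_state)):
--         if memory_state[i]['devices_id'] == 0 and new_memory_state[-1]['devices_id'] == 0:
--             new_memory_state[-1]['size'] += memory_state[i]['size']
--         else: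
--             new_memory_state.append(memory_state[i])
--     return new_memory_state
-- ===== SOURCE B (Python) =====
-- def unify_common_space(memory_state):
--     """Run-consuming rewrite: an inner loop swallows each maximal run of
--     device_id-0 fragments at once, summing its sizes into the run's first
--     fragment (mutated in place, like the original)."""
--     result = []
--     i = 0
--     n = len(memory_state)
--     while i < n:
--         f = memory_state[i]
--         i += 1
--         if f.get('devices_id') == 0:
--             while i < n and memory_state[i].get('devices_id') == 0:
--                 f['size'] += memory_state[i]['size']
--                 i += 1
--         result.append(f)
--     return result
-- ===== Notes on version B (the rewrite author's own statement) =====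
-- stated objective: alternative
-- what changed: Replaces A's single pass that tests the output list's last element with a run-consuming two-loop scan: an inner loop swallows each maximal run of device_id-0 fragments, summing their sizes into the run's first fragment.
import Mathlib
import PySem

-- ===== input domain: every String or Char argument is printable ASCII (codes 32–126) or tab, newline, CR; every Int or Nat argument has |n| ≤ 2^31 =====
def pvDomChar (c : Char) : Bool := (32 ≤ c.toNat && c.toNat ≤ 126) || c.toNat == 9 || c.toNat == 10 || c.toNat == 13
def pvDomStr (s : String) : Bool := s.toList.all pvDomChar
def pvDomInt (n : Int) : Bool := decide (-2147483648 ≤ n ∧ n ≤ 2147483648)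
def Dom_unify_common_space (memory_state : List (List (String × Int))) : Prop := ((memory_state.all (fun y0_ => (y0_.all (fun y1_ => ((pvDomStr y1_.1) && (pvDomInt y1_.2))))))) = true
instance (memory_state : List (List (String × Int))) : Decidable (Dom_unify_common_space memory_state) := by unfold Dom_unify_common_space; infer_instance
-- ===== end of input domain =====

-- B replaces A's single pass that inspects the output's last element by a run-consuming scan
-- (inner loop swallows each maximal device_id-0 run); both Pythons mutate the surviving dicts'
-- 'size' in place — the theorems here are about the return value only.

-- ===== PORT A =====
-- shared dict primitives (Python dict ops on the association list, via PySem.Dict)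
def pvGet? (d : List (String × Int)) (k : String) : Option Int := (PySem.Dict.mk d).get? k
def pvGetD (d : List (String × Int)) (k : String) (v : Int) : Int := (PySem.Dict.mk d).getD k v
def pvSet (d : List (String × Int)) (k : String) (v : Int) : List (String × Int) :=
  ((PySem.Dict.mk d).insert k v).items
-- frag['devices_id'] == 0
def pvCommon (d : List (String × Int)) : Bool := pvGet? d "devices_id" == some 0
-- d1['size'] += d2['size']  (under Pre_ both keys are present, so getD never takes its default)
def pvAddSize (d1 d2 : List (String × Int)) : List (String × Int) :=
  pvSet d1 "size" (pvGetD d1 "size" 0 + pvGetD d2 "size" 0)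

-- one iteration of A's for-loop; new_memory_state is kept reversed (head = its last element)
def pvStepA (acc : List (List (String × Int))) (frag : List (String × Int)) :
    List (List (String × Int)) :=
  match acc with
  | last :: rest =>
      if pvCommon frag && pvCommon last then pvAddSize last frag :: rest
      else frag :: last :: rest
  | [] => [frag]

def unify_common_space (memory_state : List (List (String × Int))) : List (List (String × Int)) :=
  match memory_state with
  | [] => []  -- Python raises IndexError on memory_state[0]; excluded by Pre_
  | h :: t => (t.foldl pvStepA [h]).reverse

-- ===== PORT B =====
-- B's inner while loop: swallow the rest of a common run, summing sizes into f
def pvConsume (f : List (String × Int)) : List (List (String × Int)) →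
    (List (String × Int)) × List (List (String × Int))
  | g :: rs => if pvCommon g then pvConsume (pvAddSize f g) rs else (f, g :: rs)
  | [] => (f, [])

theorem pvConsume_length (f : List (String × Int)) (l : List (List (String × Int))) :
    (pvConsume f l).2.length ≤ l.length := by
  induction l generalizing f with
  | nil => simp [pvConsume]
  | cons g rs ih =>
      simp only [pvConsume]
      split
      · exact le_trans (ih _) (Nat.le_succ _)
      · simp

def unify_common_space_alt (memory_state : List (List (String × Int))) :
    List (List (String × Int)) :=
  match memory_state with
  | [] => []
  | f :: rest =>
      if pvCommon f then
        let p := pvConsume f rest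
        p.1 :: unify_common_space_alt p.2
      else f :: unify_common_space_alt rest
termination_by memory_state.length
decreasing_by
  · exact Nat.lt_succ_of_le (pvConsume_length f rest)
  · simp

-- ===== PRECONDITION & SPEC =====
-- Pre_ is exactly the set of inputs on which Python A returns: it excludes the empty list
-- (IndexError on memory_state[0]) and the KeyError cases — a fragment whose 'devices_id'
-- A actually reads but which lacks it, and an adjacent pair of common fragments one of
-- which lacks 'size'.
def Pre_unify_common_space (memory_state : List (List (String × Int))) : Prop :=
  memory_state ≠ [] ∧
  (∀ p ∈ memory_state.zip memory_state.tail,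
      (pvGet? p.2 "devices_id").isSome ∧
      (pvCommon p.2 = true →
        (pvGet? p.1 "devices_id").isSome ∧
        (pvCommon p.1 = true →
          (pvGet? p.1 "size").isSome ∧ (pvGet? p.2 "size").isSome)))
instance (memory_state : List (List (String × Int))) : Decidable (Pre_unify_common_space memory_state) := by
  unfold Pre_unify_common_space; infer_instance

def pvWitness_unify_common_space : (List (List (String × Int))) :=
  [[("devices_id", 0), ("size", 4)], [("devices_id", 0), ("size", 2)], [("devices_id", 1), ("size", 8)]]

def Spec_unify_common_space (memory_state : List (List (String × Int))) (out : List (List (String × Int))) : Prop := out = unify_common_space_alt memory_state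
instance (memory_state : List (List (String × Int))) (out : List (List (String × Int))) : Decidable (Spec_unify_common_space memory_state out) := by unfold Spec_unify_common_space; infer_instance

-- ===== CLAIM (what is proved, stated in full; the proofs are below) =====
def Claim_equal_unify_common_space : Prop := ∀ (memory_state : List (List (String × Int))), Dom_unify_common_space memory_state → Pre_unify_common_space memory_state → Spec_unify_common_space memory_state (unify_common_space memory_state)

-- ===== LEMMAS AND PROOFS =====

-- bridge spec: merge adjacent common fragments, one step at a time
def pvMerge : List (List (String × Int)) → List (List (String × Int))
  | [] => []
  | [d] => [d]
  | d1 :: d2 :: rest =>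
      if pvCommon d1 && pvCommon d2 then pvMerge (pvAddSize d1 d2 :: rest)
      else d1 :: pvMerge (d2 :: rest)
termination_by l => l.length

-- adding sizes does not change the 'devices_id' lookup
theorem pvCommon_addSize (d1 d2 : List (String × Int)) :
    pvCommon (pvAddSize d1 d2) = pvCommon d1 := by
  have hne : ("devices_id" : String) ≠ "size" := by decide
  simp only [pvCommon, pvAddSize, pvSet, pvGet?]
  rw [show PySem.Dict.mk ((PySem.Dict.mk d1).insert "size" (pvGetD d1 "size" 0 + pvGetD d2 "size" 0)).items
        = (PySem.Dict.mk d1).insert "size" (pvGetD d1 "size" 0 + pvGetD d2 "size" 0) from rfl,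
      PySem.Dict.get?_insert_of_ne _ _ hne]

-- A's fold invariant: the reversed accumulator, prefixed, equals the merged remainder
theorem foldA_invariant (t : List (List (String × Int))) :
    ∀ last rest, (t.foldl pvStepA (last :: rest)).reverse
      = rest.reverse ++ pvMerge (last :: t) := by
  induction t with
  | nil => intro last rest; simp [pvMerge]
  | cons f t' ih =>
      intro last rest
      simp only [List.foldl, pvStepA]
      by_cases h : (pvCommon f && pvCommon last) = true
      · rw [if_pos h, ih]
        have h' : (pvCommon last && pvCommon f) = true := by
          rw [Bool.and_comm]; exact h
        simp [pvMerge, h']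
      · rw [if_neg h, ih]
        have h' : ¬ (pvCommon last && pvCommon f) = true := by
          rw [Bool.and_comm]; exact h
        simp [pvMerge, h']

-- B equals the bridge spec
theorem alt_eq_merge (ms : List (List (String × Int))) :
    unify_common_space_alt ms = pvMerge ms := by
  match ms with
  | [] => simp [unify_common_space_alt, pvMerge]
  | [f] =>
      by_cases h : pvCommon f = true <;>
        simp [unify_common_space_alt, pvConsume, pvMerge, h]
  | f :: g :: rs =>
      by_cases hf : pvCommon f = true
      · by_cases hg : pvCommon g = true
        · have h1 : unify_common_space_alt (f :: g :: rs)
              = unify_common_space_alt (pvAddSize f g :: rs) := by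
            simp only [unify_common_space_alt, pvConsume, hf, hg, if_pos,
              pvCommon_addSize]
          rw [h1, alt_eq_merge (pvAddSize f g :: rs)]
          simp [pvMerge, hf, hg]
        · have h1 : unify_common_space_alt (f :: g :: rs)
              = f :: unify_common_space_alt (g :: rs) := by
            simp [unify_common_space_alt, pvConsume, hf, hg]
          rw [h1, alt_eq_merge (g :: rs)]
          simp [pvMerge, hf, hg]
      · have h1 : unify_common_space_alt (f :: g :: rs)
            = f :: unify_common_space_alt (g :: rs) := by
          simp [unify_common_space_alt, hf]
        rw [h1, alt_eq_merge (g :: rs)]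
        simp [pvMerge, hf]
termination_by ms.length
decreasing_by all_goals simp

-- the two ports agree on every input (the Python programs differ only where one raises)
theorem ports_eq (ms : List (List (String × Int))) :
    unify_common_space ms = unify_common_space_alt ms := by
  match ms with
  | [] => simp [unify_common_space, unify_common_space_alt]
  | h :: t =>
      rw [alt_eq_merge]
      show (t.foldl pvStepA [h]).reverse = pvMerge (h :: t)
      simpa using foldA_invariant t h []

-- ===== VERDICT (by name: the statement is the Claim_ definition above) =====
theorem unify_common_space_spec : Claim_equal_unify_common_space := by
  intro ms _ _
  unfold Spec_unify_common_space
  exact ports_eq ms
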